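-- pv_equiv track=rewrite | github.com/mvalancius22/bfq | proj.py | pack_sequence
-- ===== SOURCE A (Python) =====
-- def pack_sequence(seq):
--     mapping = {'A': 0, 'C': 1, 'G': 2, 'T': 3}
--     packed = []
--     for i in range(0, len(seq), 16):
--         chunk = seq[i:i+16]
--         word = 0
--         for j, base in enumerate(chunk):
--             val = mapping.get(base, 0)  # Default to 'A' if unknown base
--             word |= (val << (j * 2))
--         packed.append(word)
--     return packed
-- ===== SOURCE B (Python) =====
-- def pack_sequence(seq):
--     mapping = {'A': 0, 'C': 1, 'G': 2, 'T': 3}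
--     packed = []
--     word = 0
--     count = 0
--     for base in seq:
--         word |= mapping.get(base, 0) << (count * 2)
--         count += 1
--         if count == 16:
--             packed.append(word)
--             word = 0
--             count = 0
--     if count > 0:
--         packed.append(word)
--     return packed
-- ===== Notes on version B (the rewrite author's own statement) =====
-- stated objective: alternative
-- what changed: Replaced A's outer loop over 16-base slices (range(0,len,16) + seq[i:i+16] + inner enumerate) by a single flat sweep over the bases with a word/count accumulator that flushes a finished word every 16 bases and appends a trailing partial word.
import Mathlib
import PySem

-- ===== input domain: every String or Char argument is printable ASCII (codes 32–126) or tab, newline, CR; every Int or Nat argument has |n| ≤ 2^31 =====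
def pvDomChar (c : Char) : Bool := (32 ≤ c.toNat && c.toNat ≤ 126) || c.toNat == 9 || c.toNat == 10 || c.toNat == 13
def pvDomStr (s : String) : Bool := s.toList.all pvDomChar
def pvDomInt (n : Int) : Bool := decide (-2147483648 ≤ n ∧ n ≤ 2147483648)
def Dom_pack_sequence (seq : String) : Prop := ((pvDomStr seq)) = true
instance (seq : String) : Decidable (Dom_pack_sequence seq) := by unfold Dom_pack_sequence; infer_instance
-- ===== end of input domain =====

-- B replaces A's slice-a-16-base-chunk outer loop by one flat stateful sweep over the
-- bases with a word/count accumulator flushed every 16 bases (alternative decomposition).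

-- the dict literal {'A':0,'C':1,'G':2,'T':3} (shared by both Pythons verbatim)
def pvMapping : PySem.Dict Char Int :=
  PySem.Dict.ofList [('A', 0), ('C', 1), ('G', 2), ('T', 3)]

-- ===== PORT A =====
-- inner loop: for j, base in enumerate(chunk): word |= val << (j*2)
-- (enumerate indices are ≥ 0, so `.toNat` on the index is exact for Python's shift)
def pvWordA (chunk : List Char) : Int :=
  (PySem.List.enumerate chunk 0).foldl
    (fun word jb => PySem.Int.bor word ((pvMapping.getD jb.2 0) <<< (jb.1.toNat * 2))) 0

-- strings are processed character-wise; slicing the string = slicing its char list (exact)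
def pack_sequence (seq : String) : List Int :=
  (PySem.List.pyRange 0 (PySem.Str.len seq) 16).foldl
    (fun packed i =>
      packed ++ [pvWordA (PySem.List.slice seq.toList (some i) (some (i + 16)))]) []

-- ===== PORT B =====
-- state = (packed, word, count); Python's count is always ≥ 0, ported as Nat (exact)
def pvStepB (st : List Int × Int × Nat) (base : Char) : List Int × Int × Nat :=
  let word := PySem.Int.bor st.2.1 ((pvMapping.getD base 0) <<< ((st.2.2 * 2 : Nat) : Int))
  let count := st.2.2 + 1
  if count = 16 then (st.1 ++ [word], 0, 0) else (st.1, word, count)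

def pack_sequence_alt (seq : String) : List Int :=
  let st := seq.toList.foldl pvStepB ([], 0, 0)
  if st.2.2 > 0 then st.1 ++ [st.2.1] else st.1

-- ===== PRECONDITION & SPEC =====
def Spec_pack_sequence (seq : String) (out : List Int) : Prop := out = pack_sequence_alt seq
instance (seq : String) (out : List Int) : Decidable (Spec_pack_sequence seq out) := by unfold Spec_pack_sequence; infer_instance

-- ===== CLAIM (what is proved, stated in full; the proofs are below) =====
def Claim_equal_pack_sequence : Prop := ∀ (seq : String), Dom_pack_sequence seq → Spec_pack_sequence seq (pack_sequence seq)

-- ===== LEMMAS AND PROOFS =====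

-- A's inner word fold started at enumerate index c with accumulator w
def pvWordAt (l : List Char) (c : Nat) (w : Int) : Int :=
  (PySem.List.enumerate l (c : Int)).foldl
    (fun word jb => PySem.Int.bor word ((pvMapping.getD jb.2 0) <<< (jb.1.toNat * 2))) w

theorem pvWordA_eq (l : List Char) : pvWordA l = pvWordAt l 0 0 := rfl

theorem pvWordAt_cons (a : Char) (l : List Char) (c : Nat) (w : Int) :
    pvWordAt (a :: l) c w
      = pvWordAt l (c + 1) (PySem.Int.bor w ((pvMapping.getD a 0) <<< ((c * 2 : Nat) : Int))) := by
  simp only [pvWordAt, PySem.List.enumerate_cons, List.foldl_cons, Int.toNat_natCast]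
  norm_cast

-- the reference chunking: one word per 16-base chunk
def pvChunks (l : List Char) : List Int :=
  if _h : l = [] then [] else pvWordAt (l.take 16) 0 0 :: pvChunks (l.drop 16)
termination_by l.length
decreasing_by
  have : 0 < l.length := List.length_pos_iff.mpr _h
  simp [List.length_drop]; omega

-- B's sweep over ≤ 16 more bases: flushes exactly when the count reaches 16
theorem pvStepB_run (l : List Char) :
    ∀ (c : Nat) (w : Int) (p : List Int), c < 16 → c + l.length ≤ 16 →
    List.foldl pvStepB (p, w, c) l =
      if c + l.length = 16 then (p ++ [pvWordAt l c w], 0, 0)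
      else (p, pvWordAt l c w, c + l.length) := by
  induction l with
  | nil =>
    intro c w p hc _
    simp [pvWordAt, PySem.List.enumerate]
    omega
  | cons a l ih =>
    intro c w p hc hle
    simp only [List.foldl_cons]
    rw [pvWordAt_cons]
    by_cases h16 : c + 1 = 16
    · have hl : l = [] := by
        have hlen : l.length = 0 := by simp at hle; omega
        exact List.length_eq_zero_iff.mp hlen
      subst hl
      simp [pvStepB, h16, pvWordAt, PySem.List.enumerate]
    · have hstep : pvStepB (p, w, c) a
          = (p, PySem.Int.bor w ((pvMapping.getD a 0) <<< ((c * 2 : Nat) : Int)), c + 1) := by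
        simp [pvStepB, h16]
      rw [hstep, ih (c + 1) _ p (by omega) (by simp only [List.length_cons] at hle; omega)]
      simp only [List.length_cons]
      split_ifs with h1 h2 h2
      · rfl
      · exfalso; omega
      · exfalso; omega
      · have harith : c + 1 + l.length = c + (l.length + 1) := by omega
        rw [harith]

-- B's whole run equals the chunk list (strong induction on the length)
theorem pvB_run :
    ∀ (n : Nat) (l : List Char) (p : List Int), l.length ≤ n →
    (let st := List.foldl pvStepB (p, 0, 0) l;
     if st.2.2 > 0 then st.1 ++ [st.2.1] else st.1) = p ++ pvChunks l := by
  intro n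
  induction n with
  | zero =>
    intro l p hl
    have : l = [] := List.length_eq_zero_iff.mp (by omega)
    subst this
    simp [pvChunks]
  | succ n ih =>
    intro l p hl
    by_cases hnil : l = []
    · subst hnil; simp [pvChunks]
    · have hpos : 0 < l.length := List.length_pos_iff.mpr hnil
      by_cases hbig : 16 ≤ l.length
      · -- a full chunk is flushed, then recurse on the rest
        have hsplit : l = l.take 16 ++ l.drop 16 := (List.take_append_drop 16 l).symm
        conv_lhs => rw [hsplit]
        rw [List.foldl_append]
        rw [pvStepB_run (l.take 16) 0 0 p (by omega)
              (by simp only [List.length_take]; omega)]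
        have h16 : 0 + (l.take 16).length = 16 := by
          simp only [List.length_take]; omega
        rw [if_pos h16]
        have := ih (l.drop 16) (p ++ [pvWordAt (l.take 16) 0 0])
          (by simp [List.length_drop]; omega)
        simp only at this ⊢
        rw [this]
        conv_rhs => rw [pvChunks]
        rw [dif_neg hnil]
        simp
      · -- a trailing partial chunk
        have hrun := pvStepB_run l 0 0 p (by omega) (by omega)
        rw [if_neg (show ¬(0 + l.length = 16) by omega)] at hrun
        simp only [hrun, gt_iff_lt]
        rw [if_pos (show 0 < 0 + l.length by omega)]
        conv_rhs => rw [pvChunks]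
        rw [dif_neg hnil]
        have hdrop : l.drop 16 = [] := List.drop_eq_nil_of_le (by omega)
        have htake : l.take 16 = l := List.take_of_length_le (by omega)
        rw [hdrop, htake]
        simp [pvChunks]

-- range(i, len, 16) steps by 16
theorem pvRange16_cons (a b : Int) (h : a < b) :
    PySem.List.pyRange a b 16 = a :: PySem.List.pyRange (a + 16) b 16 := by
  rw [PySem.List.pyRange_of_pos a b (by norm_num),
      PySem.List.pyRange_of_pos (a + 16) b (by norm_num)]
  rw [if_pos h]
  have hn : (b - a + 16 - 1) / 16
      = (if a + 16 < b then ((b - (a + 16) + 16 - 1) / 16) else 0) + 1 := by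
    split_ifs with h' <;> omega
  rw [hn]
  have hcnt : ((if a + 16 < b then ((b - (a + 16) + 16 - 1) / 16) else 0) + 1).toNat
      = (if a + 16 < b then ((b - (a + 16) + 16 - 1) / 16) else 0).toNat + 1 := by
    split_ifs with h' <;> omega
  rw [hcnt]
  have hIf : (if a + 16 < b then ((b - (a + 16) + 16 - 1) / 16) else 0).toNat
      = if a + 16 < b then ((b - (a + 16) + 16 - 1) / 16).toNat else 0 := by
    split_ifs <;> simp
  rw [hIf, List.range_succ_eq_map]
  simp only [List.map_cons, List.map_map, Nat.cast_zero, mul_zero, add_zero]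
  congr 1
  apply List.map_congr_left
  intro k _
  simp only [Function.comp]
  push_cast
  ring

theorem pvRange16_nil (a b : Int) (h : b ≤ a) : PySem.List.pyRange a b 16 = [] := by
  rw [PySem.List.pyRange_of_pos a b (by norm_num), if_neg (by omega)]
  simp

-- A's outer fold from offset i equals the chunks of the tail
theorem pvA_run (l : List Char) :
    ∀ (n i : Nat) (acc : List Int), l.length - i ≤ n →
    (PySem.List.pyRange (i : Int) (l.length : Int) 16).foldl
      (fun packed j =>
        packed ++ [pvWordA (PySem.List.slice l (some j) (some (j + 16)))]) acc
      = acc ++ pvChunks (l.drop i) := by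
  intro n
  induction n with
  | zero =>
    intro i acc hn
    have hge : l.length ≤ i := by omega
    rw [pvRange16_nil _ _ (by exact_mod_cast hge)]
    simp [List.drop_eq_nil_of_le hge, pvChunks]
  | succ n ih =>
    intro i acc hn
    by_cases hlt : i < l.length
    · rw [pvRange16_cons _ _ (by exact_mod_cast hlt)]
      simp only [List.foldl_cons]
      have hslice : PySem.List.slice l (some (i : Int)) (some ((i : Int) + 16))
          = (l.drop i).take 16 := by
        have := PySem.List.slice_natCast_add l i 16
        simpa using this
      have hcast : ((i : Int) + 16) = ((i + 16 : Nat) : Int) := by push_cast; ring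
      rw [hslice, hcast, ih (i + 16) _ (by omega)]
      have hnil : l.drop i ≠ [] := by
        simp only [ne_eq, List.drop_eq_nil_iff]; omega
      conv_rhs => rw [pvChunks]
      rw [dif_neg hnil]
      simp [pvWordA_eq, List.drop_drop]
    · have hge : l.length ≤ i := by omega
      rw [pvRange16_nil _ _ (by exact_mod_cast hge)]
      simp [List.drop_eq_nil_of_le hge, pvChunks]

-- ===== VERDICT (by name: the statement is the Claim_ definition above) =====
theorem pack_sequence_spec : Claim_equal_pack_sequence := by
  intro seq _
  unfold Spec_pack_sequence pack_sequence pack_sequence_alt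
  have hA := pvA_run seq.toList seq.toList.length 0 [] (by omega)
  have hB := pvB_run seq.toList.length seq.toList [] (le_refl _)
  simp only [Nat.cast_zero, List.drop_zero, List.nil_append] at hA hB
  rw [PySem.Str.len_eq, hA]
  exact hB.symm
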